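-- pv_equiv track=rewrite | github.com/SlayerSvamp/AdventOfCode2023 | 18_solver.py | ray_casting_inside
-- ===== SOURCE A (Python) =====
-- def ray_casting_inside(vertical, grid):
--     [min_x, max_x] = sorted(x for x, _ in grid)[::len(grid)-2]
--     [min_y, max_y] = sorted(y for _, y in grid)[::len(grid)-2]
--     inside = set()
--     for y in range(min_y, max_y + 1):
--         isInside = False
--         for x in range(min_x, max_x + 1):
--             if (x, y) in vertical:
--                 isInside ^= True
--             elif isInside:
--                 inside.add((x, y))
--     return inside
-- ===== SOURCE B (Python) =====
-- def ray_casting_inside(vertical, grid):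
--     [min_x, max_x] = sorted(x for x, _ in grid)[::len(grid)-2]
--     [min_y, max_y] = sorted(y for _, y in grid)[::len(grid)-2]
--     inside = set()
--     for y in range(min_y, max_y + 1):
--         xs = sorted({x for (x, yy) in vertical if yy == y and min_x <= x <= max_x})
--         while len(xs) >= 2:
--             for x in range(xs[0] + 1, xs[1]):
--                 inside.add((x, y))
--             xs = xs[2:]
--         if xs:
--             for x in range(xs[0] + 1, max_x + 1):
--                 inside.add((x, y))
--     return inside
-- ===== Notes on version B (the rewrite author's own statement) =====
-- stated objective: faster
-- what changed: Instead of scanning every cell of the bounding box and testing membership in `vertical` at each one, B builds for each row the sorted list of crossing x-coordinates in range and fills only the cells strictly between consecutive crossing pairs (plus the tail up to max_x after an unmatched crossing); the per-cell membership scan disappears.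
import Mathlib
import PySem

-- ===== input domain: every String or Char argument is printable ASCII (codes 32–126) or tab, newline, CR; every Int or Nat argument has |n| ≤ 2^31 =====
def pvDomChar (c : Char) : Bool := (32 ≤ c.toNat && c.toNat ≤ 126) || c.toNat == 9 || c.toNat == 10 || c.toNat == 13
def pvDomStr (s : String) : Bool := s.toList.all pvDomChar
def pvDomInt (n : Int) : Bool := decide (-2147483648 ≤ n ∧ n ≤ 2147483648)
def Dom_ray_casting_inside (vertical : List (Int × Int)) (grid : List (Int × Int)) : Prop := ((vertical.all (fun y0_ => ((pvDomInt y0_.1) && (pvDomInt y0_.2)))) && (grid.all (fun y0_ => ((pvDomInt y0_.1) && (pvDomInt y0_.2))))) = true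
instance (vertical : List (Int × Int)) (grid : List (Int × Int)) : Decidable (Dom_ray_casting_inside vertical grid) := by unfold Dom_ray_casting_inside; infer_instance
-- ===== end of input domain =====

-- B replaces A's per-cell membership scan by a per-row sorted list of crossings filled segment-wise (objective: faster).

-- ===== PORT A =====
-- shared bounding lines of both Pythons: `sorted(...)[::len(grid)-2]` twice, unpacked into two names;
-- `none` is where the Python unpacking/slice raises ValueError (len(grid) < 4), excluded by Pre_.
def rci_bounds (grid : List (Int × Int)) : Option ((Int × Int) × (Int × Int)) :=
  match PySem.List.slice? (PySem.List.sorted (grid.map (fun p => p.1)) (fun x => x) false) none none ((grid.length : Int) - 2),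
        PySem.List.slice? (PySem.List.sorted (grid.map (fun p => p.2)) (fun x => x) false) none none ((grid.length : Int) - 2) with
  | some [min_x, max_x], some [min_y, max_y] => some ((min_x, max_x), (min_y, max_y))
  | _, _ => none

def ray_casting_inside (vertical : List (Int × Int)) (grid : List (Int × Int)) : List (Int × Int) :=
  match rci_bounds grid with
  | none => []
  | some ((min_x, max_x), (min_y, max_y)) =>
      (PySem.List.pyRange min_y (max_y + 1) 1).foldl (fun inside y =>
        ((PySem.List.pyRange min_x (max_x + 1) 1).foldl
          (fun (st : Bool × PySem.Set (Int × Int)) x =>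
            if vertical.contains (x, y) then (!st.1, st.2)
            else if st.1 then (st.1, PySem.Set.add st.2 (x, y))
            else st)
          (false, inside)).2)
        PySem.Set.empty

-- ===== PORT B =====
-- Source B's while-loop: consume the sorted crossings two at a time, fill strictly between each pair,
-- and fill the tail up to max_x when one crossing remains.
def rci_fill_row (max_x y : Int) (xs : List Int) (inside : PySem.Set (Int × Int)) : PySem.Set (Int × Int) :=
  match xs with
  | a :: b :: rest =>
      rci_fill_row max_x y rest
        ((PySem.List.pyRange (a + 1) b 1).foldl (fun s x => PySem.Set.add s (x, y)) inside)
  | [a] => (PySem.List.pyRange (a + 1) (max_x + 1) 1).foldl (fun s x => PySem.Set.add s (x, y)) inside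
  | [] => inside

-- Source B's `sorted({x for (x, yy) in vertical if yy == y and min_x <= x <= max_x})`
def rci_row_xs (vertical : List (Int × Int)) (min_x max_x y : Int) : List Int :=
  PySem.List.sorted
    (PySem.Set.ofList (vertical.filterMap (fun p =>
      if p.2 == y && decide (min_x ≤ p.1) && decide (p.1 ≤ max_x) then some p.1 else none)))
    (fun x => x) false

def ray_casting_inside_alt (vertical : List (Int × Int)) (grid : List (Int × Int)) : List (Int × Int) :=
  match rci_bounds grid with
  | none => []
  | some ((min_x, max_x), (min_y, max_y)) =>
      (PySem.List.pyRange min_y (max_y + 1) 1).foldl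
        (fun inside y => rci_fill_row max_x y (rci_row_xs vertical min_x max_x y) inside)
        PySem.Set.empty

-- ===== PRECONDITION & SPEC =====
-- Python A raises ValueError when len(grid) < 4 (zero-step slice at len 2, unpacking of ≠2 values otherwise).
def Pre_ray_casting_inside (vertical : List (Int × Int)) (grid : List (Int × Int)) : Prop :=
  4 ≤ grid.length
instance (vertical : List (Int × Int)) (grid : List (Int × Int)) : Decidable (Pre_ray_casting_inside vertical grid) := by unfold Pre_ray_casting_inside; infer_instance

def pvWitness_ray_casting_inside : (List (Int × Int)) × (List (Int × Int)) :=
  ([(0,0),(0,1),(0,2),(2,0),(2,1),(2,2)], [(0,0),(0,2),(2,0),(2,2)])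

def Spec_ray_casting_inside (vertical : List (Int × Int)) (grid : List (Int × Int)) (out : List (Int × Int)) : Prop := out = ray_casting_inside_alt vertical grid
instance (vertical : List (Int × Int)) (grid : List (Int × Int)) (out : List (Int × Int)) : Decidable (Spec_ray_casting_inside vertical grid out) := by unfold Spec_ray_casting_inside; infer_instance

-- ===== CLAIM (what is proved, stated in full; the proofs are below) =====
def Claim_equal_ray_casting_inside : Prop := ∀ (vertical : List (Int × Int)) (grid : List (Int × Int)), Dom_ray_casting_inside vertical grid → Pre_ray_casting_inside vertical grid → Spec_ray_casting_inside vertical grid (ray_casting_inside vertical grid)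

-- ===== LEMMAS AND PROOFS =====

-- A's inner-loop body, named for the proofs
def rci_stepA (vertical : List (Int × Int)) (y : Int) (st : Bool × PySem.Set (Int × Int)) (x : Int) : Bool × PySem.Set (Int × Int) :=
  if vertical.contains (x, y) then (!st.1, st.2)
  else if st.1 then (st.1, PySem.Set.add st.2 (x, y))
  else st

-- add (x, y) for every x in [lo, hi)
def rci_addR (y lo hi : Int) (s : PySem.Set (Int × Int)) : PySem.Set (Int × Int) :=
  (PySem.List.pyRange lo hi 1).foldl (fun s x => PySem.Set.add s (x, y)) s

-- the segment-filling shape of A's scan, with an explicit inside flag and segment start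
def rci_gen (y hi : Int) : Bool → Int → List Int → PySem.Set (Int × Int) → PySem.Set (Int × Int)
  | inside, lo, [], s => if inside then rci_addR y lo hi s else s
  | inside, lo, c :: rest, s => rci_gen y hi (!inside) (c + 1) rest (if inside then rci_addR y lo c s else s)

theorem rci_addR_nil (y lo hi : Int) (s : PySem.Set (Int × Int)) (h : hi ≤ lo) :
    rci_addR y lo hi s = s := by
  simp [rci_addR, PySem.List.pyRange_one_eq_nil h]

theorem rci_addR_cons (y lo hi : Int) (s : PySem.Set (Int × Int)) (h : lo < hi) :
    rci_addR y lo hi s = rci_addR y (lo + 1) hi (PySem.Set.add s (lo, y)) := by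
  simp [rci_addR, PySem.List.pyRange_one_cons h]

-- A's scan over a crossing-free stretch
theorem rci_free (vertical : List (Int × Int)) (y : Int) :
    ∀ (n : Nat) (lo : Int) (inside : Bool) (s : PySem.Set (Int × Int)),
      (∀ x : Int, lo ≤ x → x < lo + (n : Int) → (x, y) ∉ vertical) →
      (PySem.List.pyRange lo (lo + (n : Int)) 1).foldl (rci_stepA vertical y) (inside, s)
        = (inside, if inside then rci_addR y lo (lo + (n : Int)) s else s) := by
  intro n
  induction n with
  | zero =>
      intro lo inside s _
      have h0 : lo + ((0 : Nat) : Int) = lo := by push_cast; ring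
      rw [h0, PySem.List.pyRange_one_eq_nil (le_refl lo), List.foldl_nil,
          rci_addR_nil y lo lo s le_rfl]
      cases inside <;> simp
  | succ n ih =>
      intro lo inside s h
      have hlt : lo < lo + ((n + 1 : Nat) : Int) := by push_cast; omega
      have hnc : (lo, y) ∉ vertical := h lo le_rfl hlt
      have e : lo + ((n + 1 : Nat) : Int) = (lo + 1) + (n : Int) := by push_cast; ring
      rw [PySem.List.pyRange_one_cons hlt, List.foldl_cons]
      have h' : ∀ x : Int, lo + 1 ≤ x → x < (lo + 1) + (n : Int) → (x, y) ∉ vertical := by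
        intro x h1 h2
        exact h x (by omega) (by omega)
      cases inside with
      | false =>
          rw [show rci_stepA vertical y (false, s) lo = (false, s) from by simp [rci_stepA, hnc]]
          rw [e, ih (lo + 1) false s h']
          simp
      | true =>
          rw [show rci_stepA vertical y (true, s) lo = (true, PySem.Set.add s (lo, y)) from by
            simp [rci_stepA, hnc]]
          rw [e, ih (lo + 1) true (PySem.Set.add s (lo, y)) h']
          simp [rci_addR_cons y lo ((lo + 1) + (n : Int)) s (by omega)]

-- A's scan equals the segment walk rci_gen over the sorted crossings
theorem rci_scan (vertical : List (Int × Int)) (y : Int) :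
    ∀ (cs : List Int), cs.Pairwise (· < ·) →
      ∀ (lo hi : Int) (inside : Bool) (s : PySem.Set (Int × Int)),
        (∀ x : Int, x ∈ cs ↔ (lo ≤ x ∧ x < hi ∧ (x, y) ∈ vertical)) →
        ((PySem.List.pyRange lo hi 1).foldl (rci_stepA vertical y) (inside, s)).2
          = rci_gen y hi inside lo cs s := by
  intro cs
  induction cs with
  | nil =>
      intro _ lo hi inside s hmem
      by_cases hle : lo ≤ hi
      · have e : hi = lo + (((hi - lo).toNat : Nat) : Int) := by omega
        rw [e, rci_free vertical y _ lo inside s (by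
          intro x h1 h2 hv
          have := (hmem x).mpr ⟨h1, by omega, hv⟩
          simp at this)]
        rfl
      · rw [PySem.List.pyRange_one_eq_nil (by omega)]
        simp [rci_gen, rci_addR_nil _ _ _ _ (by omega : hi ≤ lo)]
  | cons c rest ih =>
      intro hpw lo hi inside s hmem
      have hc := (hmem c).mp (List.mem_cons_self ..)
      obtain ⟨hlc, hch, hcv⟩ := hc
      have hpwr := (List.pairwise_cons.mp hpw).2
      have hgt := (List.pairwise_cons.mp hpw).1
      -- split the range at c
      rw [PySem.List.pyRange_one_append lo c hi hlc (le_of_lt hch), List.foldl_append]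
      have e : c = lo + (((c - lo).toNat : Nat) : Int) := by omega
      rw [show PySem.List.pyRange lo c 1 = PySem.List.pyRange lo (lo + (((c - lo).toNat : Nat) : Int)) 1 from by rw [← e]]
      rw [rci_free vertical y _ lo inside s (by
        intro x h1 h2 hv
        have hx := (hmem x).mpr ⟨h1, by omega, hv⟩
        rcases List.mem_cons.mp hx with rfl | hx'
        · omega
        · have := hgt x hx'; omega)]
      rw [← e]
      rw [PySem.List.pyRange_one_cons hch, List.foldl_cons]
      have hstep : ∀ s' : PySem.Set (Int × Int),
          rci_stepA vertical y (inside, s') c = (!inside, s') := by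
        intro s'; simp [rci_stepA, hcv]
      rw [hstep]
      rw [ih hpwr (c + 1) hi (!inside) _ (by
        intro x
        constructor
        · intro hx
          have hb := (hmem x).mpr
          have := (hmem x).mp (List.mem_cons.mpr (Or.inr hx))
          have hgx := hgt x hx
          exact ⟨by omega, this.2.1, this.2.2⟩
        · intro ⟨h1, h2, h3⟩
          have := (hmem x).mpr ⟨by omega, h2, h3⟩
          rcases List.mem_cons.mp this with rfl | hx'
          · omega
          · exact hx')]
      rfl

-- the segment walk started with inside = False is exactly Source B's pair-consuming loop
theorem rci_gen_fill (y max_x : Int) :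
    ∀ (cs : List Int) (lo : Int) (s : PySem.Set (Int × Int)),
      rci_gen y (max_x + 1) false lo cs s = rci_fill_row max_x y cs s
  | [], lo, s => by simp [rci_gen, rci_fill_row]
  | [a], lo, s => by
      simp [rci_gen, rci_fill_row, rci_addR]
  | a :: b :: rest, lo, s => by
      rw [show rci_gen y (max_x + 1) false lo (a :: b :: rest) s
            = rci_gen y (max_x + 1) false (b + 1) rest (rci_addR y (a + 1) b s) from by
        simp [rci_gen]]
      rw [rci_gen_fill y max_x rest (b + 1) (rci_addR y (a + 1) b s)]
      simp [rci_fill_row, rci_addR]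

-- the crossings list B builds is sorted and characterises A's membership test on the row
theorem rci_row_xs_pairwise (vertical : List (Int × Int)) (min_x max_x y : Int) :
    (rci_row_xs vertical min_x max_x y).Pairwise (· < ·) :=
  PySem.List.sorted_ofList_pairwise_lt _

theorem rci_row_xs_mem (vertical : List (Int × Int)) (min_x max_x y : Int) (x : Int) :
    x ∈ rci_row_xs vertical min_x max_x y ↔ (min_x ≤ x ∧ x < max_x + 1 ∧ (x, y) ∈ vertical) := by
  unfold rci_row_xs
  rw [PySem.List.mem_sorted, PySem.Set.mem_ofList, List.mem_filterMap]
  constructor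
  · rintro ⟨⟨px, py⟩, hp, hf⟩
    split at hf
    case isTrue hc =>
      obtain rfl : px = x := by simpa using hf
      simp only [Bool.and_eq_true, beq_iff_eq, decide_eq_true_eq] at hc
      obtain ⟨⟨hy, hb1⟩, hb2⟩ := hc
      subst hy
      exact ⟨hb1, by omega, hp⟩
    case isFalse => simp at hf
  · rintro ⟨h1, h2, h3⟩
    refine ⟨(x, y), h3, ?_⟩
    have h2' : x ≤ max_x := by omega
    simp [h1, h2']

-- per row: A's toggling scan equals B's segment fill
theorem rci_row (vertical : List (Int × Int)) (min_x max_x y : Int) (s : PySem.Set (Int × Int)) :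
    ((PySem.List.pyRange min_x (max_x + 1) 1).foldl (rci_stepA vertical y) (false, s)).2
      = rci_fill_row max_x y (rci_row_xs vertical min_x max_x y) s := by
  rw [rci_scan vertical y (rci_row_xs vertical min_x max_x y)
      (rci_row_xs_pairwise vertical min_x max_x y) min_x (max_x + 1) false s
      (rci_row_xs_mem vertical min_x max_x y)]
  exact rci_gen_fill y max_x (rci_row_xs vertical min_x max_x y) min_x s

-- ===== VERDICT (by name: the statement is the Claim_ definition above) =====
theorem ray_casting_inside_spec : Claim_equal_ray_casting_inside := by
  intro vertical grid _ _
  unfold Spec_ray_casting_inside ray_casting_inside ray_casting_inside_alt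
  cases rci_bounds grid with
  | none => rfl
  | some b =>
      obtain ⟨⟨min_x, max_x⟩, min_y, max_y⟩ := b
      simp only []
      congr 1
      funext inside y
      exact rci_row vertical min_x max_x y inside
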